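-- pv_equiv track=rewrite | github.com/jcruz62/BME160 | lab05/findORFs.py | boundaryConditions
-- ===== SOURCE A (Python) =====
-- def boundaryConditions(frame, sequence, startCodon, stopCodon, orf):
--     '''handles boundary cases such as dangling start and stop, adds it to orf list'''
--
--     # Determine the frame, same implemetation as findOrfs
--     Frame = -frame if frame < 0 else frame
--
--     danglingStop = -1
--     lastStart = -1
--
--     for i in range(Frame - 1, len(sequence) - 2, 3):
--         codon = sequence[i:i + 3]
--
--         if codon in stopCodon:
--             if danglingStop == -1:
--                 danglingStop = i
--                 orf.append((frame, 1, danglingStop + 3))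
--             break
--
--         if codon in startCodon:
--             lastStart = i
--
--     if lastStart != -1 and lastStart > danglingStop:
--         orf.append((frame, lastStart + 1, len(sequence)))
--
--     return danglingStop, lastStart
-- ===== SOURCE B (Python) =====
-- def boundaryConditions(frame, sequence, startCodon, stopCodon, orf):
--     '''handles boundary cases such as dangling start and stop, adds it to orf list'''
--     Frame = -frame if frame < 0 else frame
--     pos = list(range(Frame - 1, len(sequence) - 2, 3))
--     # index (into pos) of the first stop codon, len(pos) if there is none
--     stopIdx = next((k for k, i in enumerate(pos) if sequence[i:i + 3] in stopCodon), len(pos))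
--     danglingStop = pos[stopIdx] if stopIdx < len(pos) else -1
--     if stopIdx < len(pos):
--         orf.append((frame, 1, danglingStop + 3))
--     # start codons strictly before the first stop
--     starts = [i for i in pos[:stopIdx] if sequence[i:i + 3] in startCodon]
--     lastStart = starts[-1] if starts else -1
--     if stopIdx == len(pos) and lastStart != -1:
--         orf.append((frame, lastStart + 1, len(sequence)))
--     return danglingStop, lastStart
-- ===== Notes on version B (the rewrite author's own statement) =====
-- stated objective: alternative
-- what changed: Replaces A's single stateful scan with break by a two-phase decomposition: first locate the index of the first stop codon with next(enumerate(...)), then take the last start codon from a comprehension over the positions strictly before it; also performs the same orf appends.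
import Mathlib
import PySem

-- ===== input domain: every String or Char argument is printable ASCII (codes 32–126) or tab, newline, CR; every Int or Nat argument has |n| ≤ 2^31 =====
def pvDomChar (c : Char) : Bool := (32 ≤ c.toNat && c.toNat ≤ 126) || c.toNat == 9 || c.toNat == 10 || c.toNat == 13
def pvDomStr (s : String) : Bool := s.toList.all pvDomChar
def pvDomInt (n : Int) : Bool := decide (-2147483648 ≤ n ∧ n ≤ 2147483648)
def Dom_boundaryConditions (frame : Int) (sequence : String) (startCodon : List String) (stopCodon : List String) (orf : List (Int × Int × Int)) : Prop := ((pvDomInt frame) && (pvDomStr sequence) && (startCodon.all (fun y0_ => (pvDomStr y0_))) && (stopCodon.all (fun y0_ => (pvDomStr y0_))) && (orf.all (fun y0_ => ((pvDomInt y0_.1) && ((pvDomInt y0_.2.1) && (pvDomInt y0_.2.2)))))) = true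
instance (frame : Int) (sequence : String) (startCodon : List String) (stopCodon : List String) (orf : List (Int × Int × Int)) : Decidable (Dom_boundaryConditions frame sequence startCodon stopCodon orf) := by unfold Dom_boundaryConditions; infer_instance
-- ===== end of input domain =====

-- B replaces A's single stateful scan-with-break by a two-phase decomposition (first-stop index, then
-- last start before it); same return value and same orf appends (the orf mutation is a side effect not
-- modelled here: both ports compute the RETURN value only, and the two Pythons mutate orf identically).

-- ===== PORT A =====
-- codon = sequence[i:i+3]
def pvCodon (sequence : String) (i : Int) : String :=
  PySem.Str.slice sequence (some i) (some (i + 3))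

-- A's for-loop over the codon positions: state = lastStart; break at the first stop returns (i, lastStart)
def pvLoopA (sequence : String) (startCodon stopCodon : List String) : List Int → Int → Int × Int
  | [], ls => (-1, ls)
  | i :: rest, ls =>
    let codon := pvCodon sequence i
    if stopCodon.contains codon then (i, ls)
    else if startCodon.contains codon then pvLoopA sequence startCodon stopCodon rest i
    else pvLoopA sequence startCodon stopCodon rest ls

def boundaryConditions (frame : Int) (sequence : String) (startCodon : List String) (stopCodon : List String) (orf : List (Int × Int × Int)) : Int × Int :=
  let Frame := if frame < 0 then -frame else frame
  pvLoopA sequence startCodon stopCodon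
    (PySem.List.pyRange (Frame - 1) ((sequence.length : Int) - 2) 3) (-1)

-- ===== PORT B =====
def boundaryConditions_alt (frame : Int) (sequence : String) (startCodon : List String) (stopCodon : List String) (orf : List (Int × Int × Int)) : Int × Int :=
  let Frame := if frame < 0 then -frame else frame
  let pos := PySem.List.pyRange (Frame - 1) ((sequence.length : Int) - 2) 3
  -- stopIdx = next((k for k, i in enumerate(pos) if sequence[i:i+3] in stopCodon), len(pos))
  let stopIdx := (pos.findIdx? (fun i => stopCodon.contains (pvCodon sequence i))).getD pos.length
  -- danglingStop = pos[stopIdx] if stopIdx < len(pos) else -1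
  let danglingStop := if stopIdx < pos.length then pos.getD stopIdx (-1) else -1
  -- starts = [i for i in pos[:stopIdx] if sequence[i:i+3] in startCodon]  (pos[:stopIdx] = take, bound ≥ 0)
  let starts := (pos.take stopIdx).filter (fun i => startCodon.contains (pvCodon sequence i))
  -- lastStart = starts[-1] if starts else -1
  let lastStart := starts.getLast?.getD (-1)
  (danglingStop, lastStart)

-- ===== PRECONDITION & SPEC =====
def Spec_boundaryConditions (frame : Int) (sequence : String) (startCodon : List String) (stopCodon : List String) (orf : List (Int × Int × Int)) (out : Int × Int) : Prop := out = boundaryConditions_alt frame sequence startCodon stopCodon orf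
instance (frame : Int) (sequence : String) (startCodon : List String) (stopCodon : List String) (orf : List (Int × Int × Int)) (out : Int × Int) : Decidable (Spec_boundaryConditions frame sequence startCodon stopCodon orf out) := by unfold Spec_boundaryConditions; infer_instance

-- ===== CLAIM (what is proved, stated in full; the proofs are below) =====
def Claim_equal_boundaryConditions : Prop := ∀ (frame : Int) (sequence : String) (startCodon : List String) (stopCodon : List String) (orf : List (Int × Int × Int)), Dom_boundaryConditions frame sequence startCodon stopCodon orf → Spec_boundaryConditions frame sequence startCodon stopCodon orf (boundaryConditions frame sequence startCodon stopCodon orf)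

-- ===== LEMMAS AND PROOFS =====
-- B's two-phase answer on an arbitrary position list (the body of boundaryConditions_alt, lets inlined)
def pvTwoPhase (sequence : String) (startCodon stopCodon : List String) (L : List Int) (ls : Int) : Int × Int :=
  ((if (L.findIdx? (fun i => stopCodon.contains (pvCodon sequence i))).getD L.length < L.length
    then L.getD ((L.findIdx? (fun i => stopCodon.contains (pvCodon sequence i))).getD L.length) (-1)
    else -1),
   (((L.take ((L.findIdx? (fun i => stopCodon.contains (pvCodon sequence i))).getD L.length)).filter
      (fun i => startCodon.contains (pvCodon sequence i))).getLast?).getD ls)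

theorem pvGetLastD_cons (F : List Int) (i d : Int) :
    ((i :: F).getLast?).getD d = (F.getLast?).getD i := by
  cases F with
  | nil => rfl
  | cons j F' =>
    rw [List.getLast?_cons_cons]
    cases hF : (j :: F').getLast? with
    | none => simp at hF
    | some v => rfl

-- A's loop on ANY position list computes B's two-phase answer (accumulator generalised)
theorem pvLoop_eq (sequence : String) (startCodon stopCodon : List String) :
    ∀ (L : List Int) (ls : Int),
      pvLoopA sequence startCodon stopCodon L ls = pvTwoPhase sequence startCodon stopCodon L ls := by
  intro L
  induction L with
  | nil => intro ls; simp [pvLoopA, pvTwoPhase]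
  | cons i rest ih =>
    intro ls
    by_cases hstop : pvCodon sequence i ∈ stopCodon
    · simp [pvLoopA, pvTwoPhase, List.findIdx?_cons, hstop]
    · have hb : stopCodon.contains (pvCodon sequence i) = false := by simpa using hstop
      have hfi : List.findIdx? (fun j => stopCodon.contains (pvCodon sequence j)) (i :: rest)
          = (List.findIdx? (fun j => stopCodon.contains (pvCodon sequence j)) rest).map (fun n => n + 1) := by
        rw [List.findIdx?_cons, hb]
        simp
      have hK : (List.findIdx? (fun j => stopCodon.contains (pvCodon sequence j)) (i :: rest)).getD (rest.length + 1)
          = (List.findIdx? (fun j => stopCodon.contains (pvCodon sequence j)) rest).getD rest.length + 1 := by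
        rw [hfi]
        cases List.findIdx? (fun j => stopCodon.contains (pvCodon sequence j)) rest <;> rfl
      simp only [pvLoopA]
      rw [hb]
      simp only [Bool.false_eq_true, if_false]
      simp only [pvTwoPhase, List.length_cons]
      simp only [hK]
      simp only [Nat.add_lt_add_iff_right, List.getD_cons_succ, List.take_succ_cons]
      by_cases hstart : startCodon.contains (pvCodon sequence i) = true
      · rw [if_pos hstart, ih i,
          List.filter_cons_of_pos (p := fun j => startCodon.contains (pvCodon sequence j)) hstart,
          pvGetLastD_cons]
        rfl
      · rw [if_neg hstart, ih ls,
          List.filter_cons_of_neg (p := fun j => startCodon.contains (pvCodon sequence j)) hstart]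
        rfl

-- ===== VERDICT (by name: the statement is the Claim_ definition above) =====
theorem boundaryConditions_spec : Claim_equal_boundaryConditions := by
  intro frame sequence startCodon stopCodon orf _
  unfold Spec_boundaryConditions boundaryConditions boundaryConditions_alt
  exact pvLoop_eq sequence startCodon stopCodon _ (-1)
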